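-- pv_equiv track=rewrite | github.com/ZiadJanpih/Data_Protection_and_Privacy | KDgree.py | DPA_GetAnonymizedDegrees
-- ===== SOURCE A (Python) =====
-- import operator
--
-- def Identical(d):
--     cost =sum(d[0][1]-d[i][1] for i in range(len(d)))
--     I = [(d[i][0],d[0][1]) for i in range(len(d))]
--     return cost, I
--
-- def DPA_GetAnonymizedDegrees(d, k):
--     nodesCount = len(d)
--
--     if  nodesCount < 2*k:
--         return Identical(d)
--     else:
--         pairs=[]
--         for t in range( k , nodesCount-k+1 , 1):
--             DAcost,DA_d =DPA_GetAnonymizedDegrees(d[0:t],k)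
--             DA_Icost,DA_Id=Identical(d[t:nodesCount])
--             All_cost=DAcost+DA_Icost
--             All_d=DA_d+DA_Id
--             Icost,Id=Identical(d[0:nodesCount])
--             if(All_cost >Icost ):
--                 pairs.append((Icost,Id))
--             else:
--                 pairs.append((All_cost,All_d))
--
--         return   min(pairs, key=operator.itemgetter(0))
-- ===== SOURCE B (Python) =====
-- def DPA_GetAnonymizedDegrees(d, k):
--     n = len(d)
--     # prefix sums of the degrees: S[j] = sum of d[i][1] for i < j
--     S = [0] * (n + 1)
--     for i in range(n):
--         S[i + 1] = S[i] + d[i][1]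
--
--     def seg_cost(i, j):
--         # cost of turning d[i:j] into one identical group (degree d[i][1])
--         return (j - i) * d[i][1] - (S[j] - S[i]) if i < j else 0
--
--     # bottom-up DP over prefix lengths:
--     # cost[m] = optimal cost for d[:m]; choice[m] = chosen split point (None = one group)
--     cost = [0] * (n + 1)
--     choice = [None] * (n + 1)
--     for m in range(n + 1):
--         ic = seg_cost(0, m)
--         if m < 2 * k:
--             cost[m] = ic
--         else:
--             best = None
--             for t in range(k, m - k + 1):
--                 comb = cost[t] + seg_cost(t, m)
--                 cand = (comb, t) if comb <= ic else (ic, None)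
--                 if best is None or cand[0] < best[0]:
--                     best = cand
--             cost[m], choice[m] = best
--
--     # reconstruct the partition: follow the split chain, then emit groups left to right
--     cuts = [n]
--     m = n
--     while choice[m] is not None:
--         m = choice[m]
--         cuts.append(m)
--     cuts.append(0)
--     cuts.reverse()
--     out = []
--     for a, b in zip(cuts, cuts[1:]):
--         out.extend((p[0], d[a][1]) for p in d[a:b])
--     return cost[n], out
-- ===== Notes on version B (the rewrite author's own statement) =====
-- stated objective: faster
-- what changed: Replaces A's exponential recursion (re-solving every prefix at every split point) with a bottom-up O(n^2) DP over prefix lengths using prefix sums for the group costs, plus a linear back-pointer reconstruction of the partition.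
import Mathlib
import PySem

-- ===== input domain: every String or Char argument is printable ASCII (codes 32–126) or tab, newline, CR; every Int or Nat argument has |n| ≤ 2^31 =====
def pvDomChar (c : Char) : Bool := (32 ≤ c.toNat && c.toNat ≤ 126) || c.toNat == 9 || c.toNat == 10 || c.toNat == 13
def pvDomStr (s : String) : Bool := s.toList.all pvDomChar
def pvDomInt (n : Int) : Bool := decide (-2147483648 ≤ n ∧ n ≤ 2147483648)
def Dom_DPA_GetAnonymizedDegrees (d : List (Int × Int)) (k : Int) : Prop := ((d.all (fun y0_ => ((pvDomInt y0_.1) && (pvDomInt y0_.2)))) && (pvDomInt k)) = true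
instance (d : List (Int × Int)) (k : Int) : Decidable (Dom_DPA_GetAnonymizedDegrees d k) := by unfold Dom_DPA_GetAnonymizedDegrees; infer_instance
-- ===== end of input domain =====

-- B replaces A's exponential recursion by a bottom-up O(n^2) DP over prefix lengths
-- (prefix sums for group costs, back-pointer reconstruction); objective: faster.

-- ===== PORT A =====
-- Identical(d): cost of one group at d[0]'s degree, and the levelled list.
def pyIdentical (d : List (Int × Int)) : Int × List (Int × Int) :=
  match d with
  | [] => (0, [])
  | p0 :: _ => ((d.map (fun p => p0.2 - p.2)).sum, d.map (fun p => (p.1, p0.2)))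

-- A's recursion; the fuel argument (initialised to len d) is only a totality guard:
-- for k ≥ 1 each recursive call strictly shortens the list, so fuel is never exhausted.
def DPA_Afuel : Nat → List (Int × Int) → Int → Int × List (Int × Int)
  | 0, d, _ => pyIdentical d
  | fuel+1, d, k =>
    if (d.length : Int) < 2 * k then pyIdentical d
    else
      let pairs := (PySem.List.pyRange k ((d.length : Int) - k + 1) 1).map (fun t =>
        let da := DPA_Afuel fuel (PySem.List.slice d (some 0) (some t)) k
        let dai := pyIdentical (PySem.List.slice d (some t) (some (d.length : Int)))
        let allc := da.1 + dai.1
        let alld := da.2 ++ dai.2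
        let ico := pyIdentical (PySem.List.slice d (some 0) (some (d.length : Int)))
        if ico.1 < allc then (ico.1, ico.2) else (allc, alld))
      (PySem.List.min? pairs Prod.fst).getD (0, [])

def DPA_GetAnonymizedDegrees (d : List (Int × Int)) (k : Int) : Int × (List (Int × Int)) :=
  DPA_Afuel d.length d k

-- ===== PORT B =====
-- prefix sums: S[j] = sum of degrees of d[:j]  (the `for i in range(n)` loop of Source B)
def altPrefixSums : List (Int × Int) → Int → List Int
  | [], acc => [acc]
  | p :: ps, acc => acc :: altPrefixSums ps (acc + p.2)

-- seg_cost(i, j) of Source B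
def altSeg (d : List (Int × Int)) (S : List Int) (i j : Nat) : Int :=
  if i < j then ((j : Int) - (i : Int)) * (d.getD i (0, 0)).2 - (S.getD j 0 - S.getD i 0) else 0

-- candidate for split point t in Source B's inner loop: (cost, chosen split)
def altCand (d : List (Int × Int)) (S : List Int) (costs : List Int) (ic : Int) (m : Nat)
    (t : Int) : Int × Option Int :=
  let comb := costs.getD t.toNat 0 + altSeg d S t.toNat m
  if comb ≤ ic then (comb, some t) else (ic, none)

-- Source B's `if best is None or cand[0] < best[0]` update
def altPick : Option (Int × Option Int) → (Int × Option Int) → Option (Int × Option Int)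
  | none, cand => some cand
  | some b, cand => if cand.1 < b.1 then some cand else some b

-- body of Source B's `for m in range(n + 1)` loop: appends cost[m] and choice[m]
def altStep (d : List (Int × Int)) (S : List Int) (k : Int)
    (st : List Int × List (Option Int)) (m : Nat) : List Int × List (Option Int) :=
  let ic := altSeg d S 0 m
  if (m : Int) < 2 * k then (st.1 ++ [ic], st.2 ++ [none])
  else
    let best := (PySem.List.pyRange k ((m : Int) - k + 1) 1).foldl
      (fun acc t => altPick acc (altCand d S st.1 ic m t)) none
    let b := best.getD (ic, none)   -- the range is nonempty here (m ≥ 2k); getD is a totality guard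
    (st.1 ++ [b.1], st.2 ++ [b.2])

def altTable (d : List (Int × Int)) (S : List Int) (k : Int) : List Int × List (Option Int) :=
  (List.range (d.length + 1)).foldl (altStep d S k) ([], [])

-- Source B's `while choice[m] is not None` chain of split points (descending); fuel is a totality guard
def altChain (choices : List (Option Int)) : Nat → Nat → List Nat
  | 0, m => [m]
  | fuel+1, m =>
    match choices.getD m none with
    | none => [m]
    | some t => m :: altChain choices fuel t.toNat

-- Source B's final loop over zip(cuts, cuts[1:]): emit each group [a, b) levelled to d[a]'s degree
def altSegments (d : List (Int × Int)) : List Nat → List (Int × Int)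
  | [] => []
  | [_] => []
  | a :: b :: rest =>
      ((d.drop a).take (b - a)).map (fun p => (p.1, (d.getD a (0, 0)).2)) ++ altSegments d (b :: rest)

def DPA_GetAnonymizedDegrees_alt (d : List (Int × Int)) (k : Int) : Int × (List (Int × Int)) :=
  let S := altPrefixSums d 0
  let T := altTable d S k
  let cuts := 0 :: (altChain T.2 d.length d.length).reverse
  (T.1.getD d.length 0, altSegments d cuts)

-- ===== PRECONDITION & SPEC =====
-- Pre_ excludes exactly k ≤ 0, on which A always hits unbounded recursion (RecursionError).
def Pre_DPA_GetAnonymizedDegrees (d : List (Int × Int)) (k : Int) : Prop := 1 ≤ k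
instance (d : List (Int × Int)) (k : Int) : Decidable (Pre_DPA_GetAnonymizedDegrees d k) := by unfold Pre_DPA_GetAnonymizedDegrees; infer_instance
def pvWitness_DPA_GetAnonymizedDegrees : (List (Int × Int)) × Int := ([(1, 3), (2, 1), (3, 0), (4, 7)], 2)

def Spec_DPA_GetAnonymizedDegrees (d : List (Int × Int)) (k : Int) (out : Int × (List (Int × Int))) : Prop := out = DPA_GetAnonymizedDegrees_alt d k
instance (d : List (Int × Int)) (k : Int) (out : Int × (List (Int × Int))) : Decidable (Spec_DPA_GetAnonymizedDegrees d k out) := by unfold Spec_DPA_GetAnonymizedDegrees; infer_instance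

-- ===== CLAIM (what is proved, stated in full; the proofs are below) =====
def Claim_equal_DPA_GetAnonymizedDegrees : Prop := ∀ (d : List (Int × Int)) (k : Int), Dom_DPA_GetAnonymizedDegrees d k → Pre_DPA_GetAnonymizedDegrees d k → Spec_DPA_GetAnonymizedDegrees d k (DPA_GetAnonymizedDegrees d k)

-- ===== LEMMAS AND PROOFS =====

-- proof-side abbreviations for B's table
def pvS (d : List (Int × Int)) : List Int := altPrefixSums d 0
def pvT (d : List (Int × Int)) (k : Int) : List Int × List (Option Int) := altTable d (pvS d) k
def pvCost (d : List (Int × Int)) (k : Int) (m : Nat) : Int := (pvT d k).1.getD m 0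
def pvChoice (d : List (Int × Int)) (k : Int) (m : Nat) : Option Int := (pvT d k).2.getD m none
def pvTm (d : List (Int × Int)) (k : Int) (m : Nat) : List Int × List (Option Int) :=
  (List.range m).foldl (altStep d (pvS d) k) ([], [])
def segPiece (d : List (Int × Int)) (a b : Nat) : List (Int × Int) :=
  ((d.drop a).take (b - a)).map (fun p => (p.1, (d.getD a (0, 0)).2))
def pvRec (d : List (Int × Int)) (k : Int) (m : Nat) : List (Int × Int) :=
  altSegments d (0 :: (altChain (pvT d k).2 m m).reverse)
def pvInterp (d : List (Int × Int)) (k : Int) (m : Nat) : Option Int → List (Int × Int)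
  | none => (pyIdentical (d.take m)).2
  | some t => pvRec d k t.toNat ++ segPiece d t.toNat m

-- arithmetic facts about pyIdentical / prefix sums
theorem sum_map_const_sub (c : Int) (l : List (Int × Int)) :
    (l.map (fun p => c - p.2)).sum = l.length * c - (l.map Prod.snd).sum := by
  induction l with
  | nil => simp
  | cons p t ih => simp [ih]; ring

theorem pyIdentical_fst (l : List (Int × Int)) :
    (pyIdentical l).1 = l.length * (l.getD 0 (0, 0)).2 - (l.map Prod.snd).sum := by
  cases l with
  | nil => simp [pyIdentical]
  | cons p t => simp [pyIdentical, sum_map_const_sub]; ring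

theorem pyIdentical_snd (l : List (Int × Int)) :
    (pyIdentical l).2 = l.map (fun p => (p.1, (l.getD 0 (0, 0)).2)) := by
  cases l with
  | nil => simp [pyIdentical]
  | cons p t => simp [pyIdentical]

theorem altPrefixSums_getD (d : List (Int × Int)) (a : Int) (j : Nat) (hj : j ≤ d.length) :
    (altPrefixSums d a).getD j 0 = a + ((d.take j).map Prod.snd).sum := by
  induction d generalizing a j with
  | nil => simp at hj; subst hj; simp [altPrefixSums]
  | cons p t ih =>
    cases j with
    | zero => simp [altPrefixSums]
    | succ j' =>
      simp only [altPrefixSums, List.getD_cons_succ, List.take_succ_cons, List.map_cons,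
        List.sum_cons]
      rw [ih (a + p.2) j' (by simpa using hj)]
      ring

theorem altSeg_eq (d : List (Int × Int)) (i j : Nat) (hij : i ≤ j) (hj : j ≤ d.length) :
    altSeg d (pvS d) i j = (pyIdentical ((d.drop i).take (j - i))).1 := by
  rcases Nat.eq_or_lt_of_le hij with rfl | hlt
  · simp [altSeg, pyIdentical]
  · have hi : i ≤ d.length := le_trans (le_of_lt hlt) hj
    rw [pyIdentical_fst]
    have hlen : ((d.drop i).take (j - i)).length = j - i := by
      simp; omega
    have hhead : ((d.drop i).take (j - i)).getD 0 (0, 0) = d.getD i (0, 0) := by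
      rw [List.getD_eq_getElem?_getD, List.getElem?_take_of_lt (by omega), List.getElem?_drop,
        List.getD_eq_getElem?_getD]
      simp
    have hsum : (((d.drop i).take (j - i)).map Prod.snd).sum
        = ((d.take j).map Prod.snd).sum - ((d.take i).map Prod.snd).sum := by
      have : d.take j = d.take i ++ (d.drop i).take (j - i) := by
        conv_lhs => rw [← List.take_append_drop i (d.take j)]
        rw [List.take_take, Nat.min_eq_left (le_of_lt hlt), List.drop_take]
      rw [this]; simp
    rw [hlen, hhead, hsum, altSeg, if_pos hlt, pvS,
      altPrefixSums_getD d 0 j hj, altPrefixSums_getD d 0 i hi]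
    push_cast [Nat.cast_sub (le_of_lt hlt)]
    ring

theorem segPiece_eq (d : List (Int × Int)) (a b : Nat) (hab : a ≤ b) (hb : b ≤ d.length) :
    segPiece d a b = (pyIdentical ((d.drop a).take (b - a))).2 := by
  rcases Nat.eq_or_lt_of_le hab with rfl | hlt
  · simp [segPiece, pyIdentical]
  · rw [pyIdentical_snd, segPiece]
    have hhead : ((d.drop a).take (b - a)).getD 0 (0, 0) = d.getD a (0, 0) := by
      rw [List.getD_eq_getElem?_getD, List.getElem?_take_of_lt (by omega), List.getElem?_drop,
        List.getD_eq_getElem?_getD]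
      simp
    rw [hhead]

-- table infrastructure
theorem altStep_shape (d : List (Int × Int)) (S : List Int) (k : Int)
    (st : List Int × List (Option Int)) (m : Nat) :
    ∃ x y, altStep d S k st m = (st.1 ++ [x], st.2 ++ [y]) := by
  unfold altStep
  split
  · exact ⟨_, _, rfl⟩
  · exact ⟨_, _, rfl⟩

theorem pvTm_succ (d : List (Int × Int)) (k : Int) (m : Nat) :
    pvTm d k (m + 1) = altStep d (pvS d) k (pvTm d k m) m := by
  unfold pvTm
  rw [List.range_succ, List.foldl_append, List.foldl_cons, List.foldl_nil]

theorem pvTm_len (d : List (Int × Int)) (k : Int) (m : Nat) :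
    (pvTm d k m).1.length = m ∧ (pvTm d k m).2.length = m := by
  induction m with
  | zero => simp [pvTm]
  | succ m ih =>
    rw [pvTm_succ]
    obtain ⟨x, y, hxy⟩ := altStep_shape d (pvS d) k (pvTm d k m) m
    rw [hxy]
    simp [ih.1, ih.2]

theorem pvTm_stable (d : List (Int × Int)) (k : Int) (i m m' : Nat) (h1 : i < m) (h2 : m ≤ m') :
    (pvTm d k m').1.getD i 0 = (pvTm d k m).1.getD i 0 ∧
    (pvTm d k m').2.getD i none = (pvTm d k m).2.getD i none := by
  induction m' with
  | zero => omega
  | succ m' ih =>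
    rcases Nat.eq_or_lt_of_le h2 with rfl | hlt
    · exact ⟨rfl, rfl⟩
    · have hm' : m ≤ m' := by omega
      obtain ⟨hc, hch⟩ := ih hm'
      rw [pvTm_succ]
      obtain ⟨x, y, hxy⟩ := altStep_shape d (pvS d) k (pvTm d k m') m'
      rw [hxy]
      have hi1 : i < (pvTm d k m').1.length := by rw [(pvTm_len d k m').1]; omega
      have hi2 : i < (pvTm d k m').2.length := by rw [(pvTm_len d k m').2]; omega
      constructor
      · rw [← hc, List.getD_eq_getElem?_getD, List.getElem?_append_left hi1,
          ← List.getD_eq_getElem?_getD]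
      · rw [← hch, List.getD_eq_getElem?_getD, List.getElem?_append_left hi2,
          ← List.getD_eq_getElem?_getD]

theorem pvT_eq_pvTm (d : List (Int × Int)) (k : Int) : pvT d k = pvTm d k (d.length + 1) := by
  unfold pvT altTable pvTm
  rfl

theorem pv_entry (d : List (Int × Int)) (k : Int) (m : Nat) (hm : m ≤ d.length) :
    ∃ x y, altStep d (pvS d) k (pvTm d k m) m = ((pvTm d k m).1 ++ [x], (pvTm d k m).2 ++ [y]) ∧
      pvCost d k m = x ∧ pvChoice d k m = y := by
  obtain ⟨x, y, hxy⟩ := altStep_shape d (pvS d) k (pvTm d k m) m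
  refine ⟨x, y, hxy, ?_, ?_⟩
  · rw [pvCost, pvT_eq_pvTm,
      (pvTm_stable d k m (m + 1) (d.length + 1) (by omega) (by omega)).1,
      pvTm_succ, hxy]
    have hl : (pvTm d k m).1.length = m := (pvTm_len d k m).1
    simp only [List.getD_eq_getElem?_getD]
    rw [List.getElem?_append_right (le_of_eq hl)]
    simp [hl]
  · rw [pvChoice, pvT_eq_pvTm,
      (pvTm_stable d k m (m + 1) (d.length + 1) (by omega) (by omega)).2,
      pvTm_succ, hxy]
    have hl : (pvTm d k m).2.length = m := (pvTm_len d k m).2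
    simp only [List.getD_eq_getElem?_getD]
    rw [List.getElem?_append_right (le_of_eq hl)]
    simp [hl]

-- the recurrence satisfied by B's table
theorem cost_rec_lt (d : List (Int × Int)) (k : Int) (m : Nat) (hm : m ≤ d.length)
    (h : (m : Int) < 2 * k) :
    pvCost d k m = altSeg d (pvS d) 0 m ∧ pvChoice d k m = none := by
  obtain ⟨x, y, hxy, hc, hch⟩ := pv_entry d k m hm
  unfold altStep at hxy
  simp only [if_pos h] at hxy
  simp at hxy
  exact ⟨hc.trans hxy.1.symm, hch.trans hxy.2.symm⟩

theorem cost_rec_ge (d : List (Int × Int)) (k : Int) (m : Nat) (hm : m ≤ d.length) (hk : 1 ≤ k)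
    (h : ¬ (m : Int) < 2 * k) :
    (pvCost d k m, pvChoice d k m) =
      ((PySem.List.pyRange k ((m : Int) - k + 1) 1).foldl
        (fun acc t => altPick acc (altCand d (pvS d) (pvT d k).1 (altSeg d (pvS d) 0 m) m t))
        none).getD (altSeg d (pvS d) 0 m, none) := by
  obtain ⟨x, y, hxy, hc, hch⟩ := pv_entry d k m hm
  unfold altStep at hxy
  simp only [if_neg h] at hxy
  simp at hxy
  have hcong : (PySem.List.pyRange k ((m : Int) - k + 1) 1).foldl
      (fun acc t => altPick acc (altCand d (pvS d) (pvTm d k m).1 (altSeg d (pvS d) 0 m) m t))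
      none =
    (PySem.List.pyRange k ((m : Int) - k + 1) 1).foldl
      (fun acc t => altPick acc (altCand d (pvS d) (pvT d k).1 (altSeg d (pvS d) 0 m) m t))
      none := by
    apply PySem.List.foldl_congr_mem
    intro acc t htmem
    obtain ⟨htl, htr⟩ := PySem.List.mem_pyRange_one.mp htmem
    have htm : t.toNat < m := by omega
    have : (pvT d k).1.getD t.toNat 0 = (pvTm d k m).1.getD t.toNat 0 := by
      rw [pvT_eq_pvTm]
      exact (pvTm_stable d k t.toNat m (d.length + 1) htm (by omega)).1
    unfold altCand
    rw [this]
  rw [hc, hch, ← hcong, Prod.ext_iff]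
  exact ⟨hxy.1.symm, hxy.2.symm⟩

-- generic facts about the altPick fold
theorem altPick_isSome (acc : Option (Int × Option Int)) (c : Int × Option Int) :
    (altPick acc c).isSome := by
  cases acc <;> simp [altPick] <;> split <;> simp

theorem foldl_pick_isSome (c : Int → Int × Option Int) (ts : List Int)
    (acc : Option (Int × Option Int)) (h : acc.isSome ∨ ts ≠ []) :
    (ts.foldl (fun a t => altPick a (c t)) acc).isSome := by
  induction ts generalizing acc with
  | nil =>
    rcases h with h | h
    · simpa using h
    · simp at h
  | cons t ts ih =>
    rw [List.foldl_cons]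
    exact ih (altPick acc (c t)) (Or.inl (altPick_isSome acc (c t)))

theorem foldl_pick_bound (P : Int → Prop) (c : Int → Int × Option Int) (ts : List Int)
    (hc : ∀ t ∈ ts, ∀ u, (c t).2 = some u → P u)
    (acc : Option (Int × Option Int)) (hacc : ∀ x u, acc = some x → x.2 = some u → P u) :
    ∀ x u, ts.foldl (fun a t => altPick a (c t)) acc = some x → x.2 = some u → P u := by
  induction ts generalizing acc with
  | nil => simpa using hacc
  | cons t ts ih =>
    rw [List.foldl_cons]
    refine ih (fun u hu => hc u (List.mem_cons_of_mem t hu)) (altPick acc (c t)) ?_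
    intro x u hx hxu
    have hct : ∀ u, (c t).2 = some u → P u := hc t (List.mem_cons_self)
    cases acc with
    | none =>
      simp [altPick] at hx
      exact hct u (hx ▸ hxu)
    | some b =>
      simp only [altPick] at hx
      split at hx
      · exact hct u ((Option.some_inj.mp hx) ▸ hxu)
      · exact hacc x u ((Option.some_inj.mp hx) ▸ rfl) hxu

theorem pick_fold_map_aux (g : Int × Option Int → Int × List (Int × Int))
    (hg : ∀ x, (g x).1 = x.1) (c : Int → Int × Option Int) (f : Int → Int × List (Int × Int)) :
    ∀ ts : List Int, (∀ t ∈ ts, f t = g (c t)) → ∀ acc : Option (Int × Option Int),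
      List.foldl
        (fun acc x =>
          match acc with
          | none => some x
          | some mm => if x.1 < mm.1 then some x else some mm)
        (acc.map g) (ts.map f) =
      (ts.foldl (fun a t => altPick a (c t)) acc).map g := by
  intro ts
  induction ts with
  | nil => intro _ acc; simp
  | cons t ts ih =>
    intro h acc
    rw [List.map_cons, List.foldl_cons, List.foldl_cons, h t List.mem_cons_self]
    have step : (match acc.map g with
        | none => some (g (c t))
        | some mm => if (g (c t)).1 < mm.1 then some (g (c t)) else some mm) =
        (altPick acc (c t)).map g := by
      cases acc with
      | none => simp [altPick]
      | some b => simp [altPick, hg]; split <;> simp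
    rw [step]
    exact ih (fun u hu => h u (List.mem_cons_of_mem t hu)) (altPick acc (c t))

theorem min?_eq_pick_fold (g : Int × Option Int → Int × List (Int × Int))
    (hg : ∀ x, (g x).1 = x.1) (c : Int → Int × Option Int) (f : Int → Int × List (Int × Int))
    (ts : List Int) (h : ∀ t ∈ ts, f t = g (c t)) :
    PySem.List.min? (ts.map f) Prod.fst =
      (ts.foldl (fun a t => altPick a (c t)) none).map g := by
  have key := pick_fold_map_aux g hg c f ts h none
  simp only [Option.map_none] at key
  simp only [PySem.List.min?]
  convert key using 2
  funext a x
  cases a <;> rfl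

-- choice bound: a recorded split point lies strictly inside the prefix
theorem choice_bound (d : List (Int × Int)) (k : Int) (hk : 1 ≤ k) (m : Nat) (hm : m ≤ d.length) :
    ∀ t, pvChoice d k m = some t → k ≤ t ∧ t < (m : Int) - k + 1 := by
  intro t ht
  by_cases h : (m : Int) < 2 * k
  · rw [(cost_rec_lt d k m hm h).2] at ht
    simp at ht
  · have hrec := cost_rec_ge d k m hm hk h
    have hne : PySem.List.pyRange k ((m : Int) - k + 1) 1 ≠ [] := by
      have : (PySem.List.pyRange k ((m : Int) - k + 1) 1).length = ((m : Int) - k + 1 - k).toNat :=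
        PySem.List.length_pyRange_one _ _
      intro hnil
      rw [hnil] at this
      simp at this
      omega
    set fold := (PySem.List.pyRange k ((m : Int) - k + 1) 1).foldl
      (fun acc t => altPick acc (altCand d (pvS d) (pvT d k).1 (altSeg d (pvS d) 0 m) m t))
      none with hfold
    have hsome : fold.isSome :=
      foldl_pick_isSome _ _ _ (Or.inr hne)
    obtain ⟨b, hb⟩ := Option.isSome_iff_exists.mp hsome
    have hbnd := foldl_pick_bound (fun u => k ≤ u ∧ u < (m : Int) - k + 1)
      (altCand d (pvS d) (pvT d k).1 (altSeg d (pvS d) 0 m) m)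
      (PySem.List.pyRange k ((m : Int) - k + 1) 1)
      (by
        intro u hu v hv
        by_cases hcase : (pvT d k).1.getD u.toNat 0 + altSeg d (pvS d) u.toNat m
            ≤ altSeg d (pvS d) 0 m
        · simp only [altCand] at hv
          rw [if_pos (by simpa [List.getD_eq_getElem?_getD] using hcase)] at hv
          simp at hv
          exact hv ▸ PySem.List.mem_pyRange_one.mp hu
        · simp only [altCand] at hv
          rw [if_neg (by simpa [List.getD_eq_getElem?_getD] using hcase)] at hv
          simp at hv)
      none (by simp) b t hb
    have : pvChoice d k m = b.2 := by
      have := congrArg Prod.snd hrec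
      simpa [hb] using this
    exact hbnd (by rw [← this, ht])

-- chain lemmas
theorem altChain_head (ch : List (Option Int)) (fuel m : Nat) :
    ∃ l, altChain ch fuel m = m :: l := by
  cases fuel <;> simp [altChain] <;> split <;> simp

theorem altChain_fuel_irrel (d : List (Int × Int)) (k : Int) (hk : 1 ≤ k) (m : Nat)
    (hm : m ≤ d.length) (f1 f2 : Nat) (h1 : m ≤ f1) (h2 : m ≤ f2) :
    altChain (pvT d k).2 f1 m = altChain (pvT d k).2 f2 m := by
  revert hm h1 h2
  induction m using Nat.strong_induction_on generalizing f1 f2 with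
  | _ m ih =>
    intro hm h1 h2
    cases f1 with
    | zero =>
      have hm0 : m = 0 := by omega
      subst hm0
      cases f2 with
      | zero => rfl
      | succ f2' =>
        simp only [altChain]
        cases hch : (pvT d k).2.getD 0 none with
        | none => rfl
        | some t =>
          have hb := choice_bound d k hk 0 (by omega) t hch
          simp at hb
          omega
    | succ f1' =>
      cases f2 with
      | zero =>
        have hm0 : m = 0 := by omega
        subst hm0
        simp only [altChain]
        cases hch : (pvT d k).2.getD 0 none with
        | none => rfl
        | some t =>
          have hb := choice_bound d k hk 0 (by omega) t hch
          simp at hb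
          omega
      | succ f2' =>
        simp only [altChain]
        cases hch : (pvT d k).2.getD m none with
        | none => rfl
        | some t =>
          have hb := choice_bound d k hk m hm t hch
          have htm : t.toNat < m := by omega
          dsimp only
          rw [ih t.toNat htm f1' f2' (by omega) (by omega) (by omega)]

-- segments lemmas
theorem altSegments_append (d : List (Int × Int)) (cuts : List Nat) (a b : Nat)
    (h : cuts.getLast? = some a) :
    altSegments d (cuts ++ [b]) = altSegments d cuts ++ segPiece d a b := by
  induction cuts with
  | nil => simp at h
  | cons x rest ih =>
    cases rest with
    | nil =>
      simp at h
      subst h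
      simp [altSegments, segPiece]
    | cons y rest' =>
      have hlast : (y :: rest').getLast? = some a := by
        rw [← h, List.getLast?_cons_cons]
      simp only [List.cons_append, altSegments]
      rw [show (y :: rest') ++ [b] = y :: (rest' ++ [b]) from rfl] at *
      rw [ih hlast, List.append_assoc]

theorem pvRec_none (d : List (Int × Int)) (k : Int) (m : Nat) (hm : m ≤ d.length)
    (h : pvChoice d k m = none) :
    pvRec d k m = (pyIdentical (d.take m)).2 := by
  unfold pvRec
  have hch : altChain (pvT d k).2 m m = [m] := by
    cases m with
    | zero => rfl
    | succ m' =>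
      simp only [altChain]
      rw [show (pvT d k).2.getD (m' + 1) none = none from h]
  rw [hch]
  simp only [List.reverse_cons, List.reverse_nil, List.nil_append]
  rw [pyIdentical_snd]
  show segPiece d 0 m ++ altSegments d [m] = _
  cases Nat.eq_zero_or_pos m with
  | inl h0 => subst h0; simp [segPiece, altSegments]
  | inr hpos =>
    have hh : (List.take m d)[0]?.getD ((0 : Int), (0 : Int)) = d[0]?.getD (0, 0) := by
      rw [List.getElem?_take_of_lt hpos]
    simp [segPiece, altSegments, hh]

theorem pvRec_some (d : List (Int × Int)) (k : Int) (hk : 1 ≤ k) (m : Nat) (hm : m ≤ d.length)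
    (t : Int) (h : pvChoice d k m = some t) (ht1 : k ≤ t) (ht2 : t < (m : Int) - k + 1) :
    pvRec d k m = pvRec d k t.toNat ++ segPiece d t.toNat m := by
  have hm2 : 2 * k ≤ (m : Int) := by omega
  have htm : t.toNat < m := by omega
  obtain ⟨m', rfl⟩ : ∃ m', m = m' + 1 := ⟨m - 1, by omega⟩
  unfold pvRec
  simp only [altChain]
  rw [show (pvT d k).2.getD (m' + 1) none = some t from h]
  dsimp only
  rw [altChain_fuel_irrel d k hk t.toNat (by omega) m' t.toNat (by omega) (le_refl _)]
  obtain ⟨l, hl⟩ := altChain_head (pvT d k).2 t.toNat t.toNat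
  rw [List.reverse_cons]
  rw [show (0 : Nat) :: ((altChain (pvT d k).2 t.toNat t.toNat).reverse ++ [m' + 1])
      = ((0 : Nat) :: (altChain (pvT d k).2 t.toNat t.toNat).reverse) ++ [m' + 1] from rfl]
  apply altSegments_append
  rw [hl, List.reverse_cons]
  rw [show (0 : Nat) :: (l.reverse ++ [t.toNat]) = ((0 : Nat) :: l.reverse) ++ [t.toNat] from rfl]
  exact List.getLast?_concat

-- the main induction
theorem main_inv (d : List (Int × Int)) (k : Int) (hk : 1 ≤ k) (m : Nat) (hm : m ≤ d.length) :
    ∀ fuel, m ≤ fuel → DPA_Afuel fuel (d.take m) k = (pvCost d k m, pvRec d k m) := by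
  revert hm
  induction m using Nat.strong_induction_on with
  | _ m ih =>
    intro hm fuel hfuel
    have hlen : (d.take m).length = m := by simp [hm]
    cases fuel with
    | zero =>
      have hm0 : m = 0 := by omega
      subst hm0
      obtain ⟨hc, hch⟩ := cost_rec_lt d k 0 (by omega) (by push_cast; omega)
      rw [pvRec_none d k 0 (by omega) hch]
      simp [DPA_Afuel, pyIdentical, hc, altSeg]
    | succ fuel =>
      by_cases hlt : (m : Int) < 2 * k
      · obtain ⟨hc, hch⟩ := cost_rec_lt d k m hm hlt
        rw [pvRec_none d k m hm hch]
        simp only [DPA_Afuel, hlen]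
        rw [if_pos hlt, hc, altSeg_eq d 0 m (Nat.zero_le m) hm]
        simp
      · simp only [DPA_Afuel, hlen]
        rw [if_neg hlt]
        have hmap : ∀ t ∈ PySem.List.pyRange k ((m : Int) - k + 1) 1,
            (fun t =>
              if (pyIdentical (PySem.List.slice (List.take m d) (some 0) (some (m : Int)))).1 <
                  (DPA_Afuel fuel (PySem.List.slice (List.take m d) (some 0) (some t)) k).1 +
                    (pyIdentical (PySem.List.slice (List.take m d) (some t) (some (m : Int)))).1
              then
                ((pyIdentical (PySem.List.slice (List.take m d) (some 0) (some (m : Int)))).1,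
                 (pyIdentical (PySem.List.slice (List.take m d) (some 0) (some (m : Int)))).2)
              else
                ((DPA_Afuel fuel (PySem.List.slice (List.take m d) (some 0) (some t)) k).1 +
                   (pyIdentical (PySem.List.slice (List.take m d) (some t) (some (m : Int)))).1,
                 (DPA_Afuel fuel (PySem.List.slice (List.take m d) (some 0) (some t)) k).2 ++
                   (pyIdentical (PySem.List.slice (List.take m d) (some t) (some (m : Int)))).2)) t =
            (fun x => (x.1, pvInterp d k m x.2))
              (altCand d (pvS d) (pvT d k).1 (altSeg d (pvS d) 0 m) m t) := by
          intro t htm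
          obtain ⟨ht1, ht2⟩ := PySem.List.mem_pyRange_one.mp htm
          have ht0 : 0 ≤ t := by omega
          have htn : t.toNat ≤ m := by omega
          have htn' : t.toNat < m := by omega
          have hs1 : PySem.List.slice (d.take m) (some 0) (some t) = d.take t.toNat := by
            rw [PySem.List.slice_zero_start, PySem.List.slice_to _ ht0, List.take_take]
            congr 1
            omega
          have hs2 : PySem.List.slice (d.take m) (some t) (some (m : Int))
              = (d.drop t.toNat).take (m - t.toNat) := by
            rw [PySem.List.slice_toNat _ ht0 (Int.natCast_nonneg m), Int.toNat_natCast,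
              List.drop_take, List.take_take, Nat.min_self]
          have hs3 : PySem.List.slice (d.take m) (some 0) (some (m : Int)) = d.take m := by
            rw [PySem.List.slice_zero_start, PySem.List.slice_to _ (Int.natCast_nonneg m),
              Int.toNat_natCast, List.take_take, Nat.min_self]
          simp only [hs1, hs2, hs3]
          rw [ih t.toNat htn' (by omega) fuel (by omega)]
          have e1 : altSeg d (pvS d) 0 m = (pyIdentical (d.take m)).1 := by
            rw [altSeg_eq d 0 m (Nat.zero_le m) hm]
            simp
          have e2 : (pyIdentical ((d.drop t.toNat).take (m - t.toNat))).1
              = altSeg d (pvS d) t.toNat m := (altSeg_eq d t.toNat m htn hm).symm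
          have e3 : (pyIdentical ((d.drop t.toNat).take (m - t.toNat))).2
              = segPiece d t.toNat m := (segPiece_eq d t.toNat m htn hm).symm
          unfold altCand
          have hcost : (pvT d k).1.getD t.toNat 0 = pvCost d k t.toNat := rfl
          rw [hcost]
          dsimp only
          by_cases hcc : pvCost d k t.toNat + altSeg d (pvS d) t.toNat m
              ≤ altSeg d (pvS d) 0 m
          · rw [if_pos hcc]
            have hno : ¬ ((pyIdentical (d.take m)).1
                < pvCost d k t.toNat + (pyIdentical ((d.drop t.toNat).take (m - t.toNat))).1) := by
              rw [e2, ← e1]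
              omega
            rw [if_neg hno]
            simp only [pvInterp, e2, e3]
          · rw [if_neg hcc]
            have hyes : (pyIdentical (d.take m)).1
                < pvCost d k t.toNat + (pyIdentical ((d.drop t.toNat).take (m - t.toNat))).1 := by
              rw [e2, ← e1]
              omega
            rw [if_pos hyes]
            simp only [pvInterp, e1]
        rw [min?_eq_pick_fold (fun x => (x.1, pvInterp d k m x.2)) (fun x => rfl)
          (altCand d (pvS d) (pvT d k).1 (altSeg d (pvS d) 0 m) m) _ _ hmap]
        have hne : PySem.List.pyRange k ((m : Int) - k + 1) 1 ≠ [] := by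
          have hlp : (PySem.List.pyRange k ((m : Int) - k + 1) 1).length
              = ((m : Int) - k + 1 - k).toNat := PySem.List.length_pyRange_one _ _
          intro hnil
          rw [hnil] at hlp
          simp at hlp
          omega
        have hsome := foldl_pick_isSome
          (altCand d (pvS d) (pvT d k).1 (altSeg d (pvS d) 0 m) m)
          (PySem.List.pyRange k ((m : Int) - k + 1) 1) none (Or.inr hne)
        obtain ⟨b, hb⟩ := Option.isSome_iff_exists.mp hsome
        rw [hb]
        simp only [Option.map_some, Option.getD_some]
        have hrec := cost_rec_ge d k m hm hk hlt
        rw [hb] at hrec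
        simp only [Option.getD_some] at hrec
        have hpc : pvCost d k m = b.1 := congrArg Prod.fst hrec
        have hpch : pvChoice d k m = b.2 := congrArg Prod.snd hrec
        rw [← hpc]
        cases hbch : b.2 with
        | none =>
          have hcn : pvChoice d k m = none := hpch.trans hbch
          rw [pvRec_none d k m hm hcn]
          simp only [pvInterp]
        | some t =>
          have hcht : pvChoice d k m = some t := hpch.trans hbch
          obtain ⟨hb1, hb2⟩ := choice_bound d k hk m hm t hcht
          rw [pvRec_some d k hk m hm t hcht hb1 hb2]
          simp only [pvInterp]

theorem main_equiv (d : List (Int × Int)) (k : Int) (hk : 1 ≤ k) :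
    DPA_GetAnonymizedDegrees d k = DPA_GetAnonymizedDegrees_alt d k := by
  unfold DPA_GetAnonymizedDegrees
  have h := main_inv d k hk d.length (le_refl _) d.length (le_refl _)
  rw [List.take_length] at h
  rw [h]
  rfl

-- ===== VERDICT (by name: the statement is the Claim_ definition above) =====
theorem DPA_GetAnonymizedDegrees_spec : Claim_equal_DPA_GetAnonymizedDegrees := by
  intro d k _ hk
  unfold Spec_DPA_GetAnonymizedDegrees
  exact main_equiv d k hk
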